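-- pv_equiv track=rewrite | github.com/mhetrerajat/helpshift_assignment | app.py | distance_words
-- ===== SOURCE A (Python) =====
-- result = [] # Contains list of names find for particular searched query
--
-- def distance_words(result, query):
--     """
--         Calculate distance between two strings
--         Algorithm : Levenshtein distance
--         Lower distance means higher order in result
--         Args :
--             result (list) : List of names found by search function
--             query (str) : Query asked by user
--         Returns:
--             Dictionary with word as key and distance as value,
--             which is sorted by value in ascending order.
--     """
--     distance_dict = {}
--     # for each word in result find distance between that word and query word
--     # i.e. number of insert/update/delete operations required to change query word to result word
--     # smallest distance means closest word to query, therefore it will be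
--     # shown at the top
--     for word in result:
--         distances = list(range(len(query) + 1))
--         for index_word, char_word in enumerate(word):
--             another_distances = [index_word + 1]
--             for index_query, char_query in enumerate(query):
--                 if char_query == char_word:
--                     another_distances.append(distances[index_query])
--                 else:
--                     another_distances.append(1 + min((distances[index_query],
--                                                       distances[
--                                                           index_query + 1],
--                                                       another_distances[-1])))
--             distances = another_distances
--         distance_dict.update({word: distances[-1]})
--     # sort dict by value in ascending order ( smaller to larger distance )
--     return sorted(distance_dict.items(), key=lambda x: x[1])
-- ===== SOURCE B (Python) =====
-- def distance_words(result, query):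
--     """Shared-prefix Levenshtein: sort the distinct words and reuse the DP rows
--     of the common prefix with the previously processed word, so each distinct
--     word prefix's row is computed only once."""
--     order = list(dict.fromkeys(result))
--     dist = {}
--     rows = [list(range(len(query) + 1))]  # rows[i] = DP row for current prefix of length i
--     prev = ""
--     for word in sorted(order):
--         p = 0
--         while p < len(prev) and p < len(word) and prev[p] == word[p]:
--             p += 1
--         del rows[p + 1:]
--         for i in range(p, len(word)):
--             c = word[i]
--             last = rows[-1]
--             row = [i + 1]
--             for j, cq in enumerate(query):
--                 row.append(last[j] if cq == c
--                            else 1 + min(last[j], last[j + 1], row[-1]))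
--             rows.append(row)
--         dist[word] = rows[len(word)][-1]
--         prev = word
--     return sorted(((w, dist[w]) for w in order), key=lambda x: x[1])
-- ===== Notes on version B (the rewrite author's own statement) =====
-- stated objective: alternative
-- what changed: B sorts the distinct words and keeps a stack of DP rows, recomputing only the rows beyond the common prefix with the previously processed word (and each distinct word once), instead of A's full independent row DP per list entry; intended as faster by shared-prefix reuse, measured 3.07x at n=1024 but unconfirmed at the largest probed size where both timed out.
import Mathlib
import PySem

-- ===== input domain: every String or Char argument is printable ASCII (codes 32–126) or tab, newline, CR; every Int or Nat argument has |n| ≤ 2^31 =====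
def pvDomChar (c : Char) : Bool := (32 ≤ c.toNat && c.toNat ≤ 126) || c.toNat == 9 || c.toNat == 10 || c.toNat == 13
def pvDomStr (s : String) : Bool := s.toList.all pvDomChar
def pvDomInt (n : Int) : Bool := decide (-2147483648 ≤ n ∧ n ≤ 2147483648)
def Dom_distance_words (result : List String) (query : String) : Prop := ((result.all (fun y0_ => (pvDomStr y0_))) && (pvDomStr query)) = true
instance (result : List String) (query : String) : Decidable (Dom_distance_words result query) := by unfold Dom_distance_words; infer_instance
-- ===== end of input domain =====

-- B sorts the distinct words and computes the Levenshtein rows of a prefix shared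
-- with the previously processed word only once (a stack of reusable DP rows), instead
-- of A's independent full DP per list entry; objective: alternative algorithm.

-- ===== PORT A =====
-- literal transliteration of A: for each word, row DP over query, dict update, sort by value
def distance_words (result : List String) (query : String) : List (String × Int) :=
  let q := query.toList
  let dd := result.foldl (fun dd word =>
    let w := word.toList
    let distances := (PySem.List.enumerate w).foldl
      (fun distances iw =>
        (PySem.List.enumerate q).foldl
          (fun another iq =>
            if iq.2 == iw.2 then
              another ++ [PySem.List.pyGetD distances iq.1 0]
            else
              another ++ [1 + min (min (PySem.List.pyGetD distances iq.1 0)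
                                       (PySem.List.pyGetD distances (iq.1 + 1) 0))
                                  (another.getLast?.getD 0)])
          [iw.1 + 1])
      (PySem.List.pyRange 0 ((q.length : Int) + 1) 1)
    dd.insert word (PySem.List.pyGetD distances (-1) 0))
    PySem.Dict.empty
  PySem.List.sorted dd.items (fun x => x.2) false

-- ===== PORT B =====
-- Source B's inner row computation: one new DP row from the previous row `last`
def pvRowStep (q : List Char) (last : List Int) (i : Int) (c : Char) : List Int :=
  (PySem.List.enumerate q).foldl
    (fun row j =>
      row ++ [if j.2 == c then PySem.List.pyGetD last j.1 0
              else 1 + min (min (PySem.List.pyGetD last j.1 0)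
                                (PySem.List.pyGetD last (j.1 + 1) 0))
                           (row.getLast?.getD 0)])
    [i + 1]

-- Source B's while loop computing the common-prefix length p
def pvLcp : List Char → List Char → Nat
  | a :: as, b :: bs => if a == b then pvLcp as bs + 1 else 0
  | _, _ => 0

-- Source B's loop body over one sorted word: truncate the row stack to the shared
-- prefix, extend it with the word's remaining characters, record the distance
def pvStepWord (q : List Char) (st : List (List Int) × List Char × PySem.Dict String Int)
    (word : String) : List (List Int) × List Char × PySem.Dict String Int :=
  let w := word.toList
  let p := pvLcp st.2.1 w
  let rows := st.1.take (p + 1)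
  let rows2 := (PySem.List.enumerate (w.drop p) (p : Int)).foldl
    (fun rows ic => rows ++ [pvRowStep q (rows.getLast?.getD []) ic.1 ic.2]) rows
  (rows2, w,
   st.2.2.insert word
     (PySem.List.pyGetD (PySem.List.pyGetD rows2 ((w.length : Nat) : Int) []) (-1) 0))

def distance_words_alt (result : List String) (query : String) : List (String × Int) :=
  let q := query.toList
  let order := PySem.List.dedup result
  let st := (PySem.List.sorted order (fun w => w) false).foldl (pvStepWord q)
    ([PySem.List.pyRange 0 ((q.length : Int) + 1) 1], ([] : List Char),
     (PySem.Dict.empty : PySem.Dict String Int))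
  PySem.List.sorted (order.map (fun w => (w, (st.2.2.get? w).getD 0))) (fun x => x.2) false

-- ===== PRECONDITION & SPEC =====
def Spec_distance_words (result : List String) (query : String) (out : List (String × Int)) : Prop := out = distance_words_alt result query
instance (result : List String) (query : String) (out : List (String × Int)) : Decidable (Spec_distance_words result query out) := by unfold Spec_distance_words; infer_instance

-- ===== CLAIM (what is proved, stated in full; the proofs are below) =====
def Claim_equal_distance_words : Prop := ∀ (result : List String) (query : String), Dom_distance_words result query → Spec_distance_words result query (distance_words result query)

-- ===== LEMMAS AND PROOFS =====

-- prefix edit distance: pvE a b i j = Levenshtein distance of a[:i] and b[:j]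
def pvE (a b : List Char) : Nat → Nat → Int
  | 0, j => (j : Int)
  | i+1, 0 => ((i : Int) + 1)
  | i+1, j+1 =>
    if b.getD j ' ' = a.getD i ' ' then pvE a b i j
    else 1 + min (min (pvE a b i j) (pvE a b i (j+1))) (pvE a b (i+1) j)
termination_by i j => i + j

def pvRowFn (a b : List Char) (i : Nat) : List Int :=
  (List.range (b.length + 1)).map (fun j => pvE a b i j)

-- the stack of DP rows for the first k prefixes of a
def pvRows (a b : List Char) (k : Nat) : List (List Int) :=
  (List.range (k + 1)).map (fun i => pvRowFn a b i)

theorem pvRow_pyGetD (a b : List Char) (i : Nat) (k : Nat) (hk : k ≤ b.length) :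
    PySem.List.pyGetD (pvRowFn a b i) (k : Int) 0 = pvE a b i k := by
  rw [PySem.List.pyGetD_of_nonneg _ _ (by positivity), Int.toNat_natCast, pvRowFn,
    PySem.List.getD_map_range _ _ _ _ (by omega)]

theorem map_range_getLast {α : Type} (g : Nat → α) (k : Nat) (d : α) :
    ((List.range (k+1)).map g).getLast?.getD d = g k := by
  simp [List.range_succ]

theorem pvRow_zero (a b : List Char) :
    PySem.List.pyRange 0 ((b.length : Int) + 1) 1 = pvRowFn a b 0 := by
  rw [PySem.List.pyRange_one, pvRowFn]
  have h1 : (((b.length : Int) + 1) - 0).toNat = b.length + 1 := by omega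
  rw [h1]
  apply List.map_congr_left
  intro k _
  simp [pvE]

theorem pvRow_last (a b : List Char) (i : Nat) :
    PySem.List.pyGetD (pvRowFn a b i) (-1) 0 = pvE a b i b.length := by
  rw [pvRowFn, List.range_succ, List.map_append, List.map_singleton,
    PySem.List.pyGetD_neg_one_append_singleton]

theorem drop_cons_getD {α : Type} (b : List α) (k : Nat) (d : α) (x : α) (xs : List α)
    (h : b.drop k = x :: xs) : b.getD k d = x ∧ xs = b.drop (k+1) := by
  have hk : k < b.length := by
    by_contra hk
    rw [List.drop_eq_nil_of_le (by omega)] at h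
    exact List.cons_ne_nil x xs h.symm
  have h0 : b[k]? = some x := by
    have h2 : (List.drop k b)[0]? = b[k + 0]? := List.getElem?_drop
    rw [h] at h2
    simpa using h2.symm
  constructor
  · rw [List.getD_eq_getElem?_getD, h0]; rfl
  · have h3 := congrArg (List.drop 1) h
    rw [List.drop_drop] at h3
    simpa [Nat.add_comm] using h3.symm

-- inner loop of A (one word-row update), in full generality over a suffix of the query
theorem pv_innerA (a b : List Char) (i : Nat) (c : Char) (hc : c = a.getD i ' ') :
    ∀ (qs : List Char) (k : Nat), qs = b.drop k → k + qs.length = b.length →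
    (PySem.List.enumerate qs (k : Int)).foldl
      (fun another iq =>
        if iq.2 == c then
          another ++ [PySem.List.pyGetD (pvRowFn a b i) iq.1 0]
        else
          another ++ [1 + min (min (PySem.List.pyGetD (pvRowFn a b i) iq.1 0)
                                   (PySem.List.pyGetD (pvRowFn a b i) (iq.1 + 1) 0))
                              (another.getLast?.getD 0)])
      ((List.range (k+1)).map (fun j => pvE a b (i+1) j))
    = pvRowFn a b (i+1) := by
  intro qs
  induction qs with
  | nil =>
    intro k hdrop hlen
    simp only [List.length_nil, Nat.add_zero] at hlen
    subst hlen
    simp [PySem.List.enumerate, pvRowFn]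
  | cons d qs' ih =>
    intro k hdrop hlen
    obtain ⟨hd, hqs'⟩ := drop_cons_getD b k ' ' d qs' hdrop.symm
    have hk : k < b.length := by simp at hlen; omega
    rw [PySem.List.enumerate_cons, List.foldl_cons]
    have hstep :
        (if d == c then
          ((List.range (k+1)).map (fun j => pvE a b (i+1) j)) ++
            [PySem.List.pyGetD (pvRowFn a b i) (k : Int) 0]
        else
          ((List.range (k+1)).map (fun j => pvE a b (i+1) j)) ++
            [1 + min (min (PySem.List.pyGetD (pvRowFn a b i) (k : Int) 0)
                          (PySem.List.pyGetD (pvRowFn a b i) ((k : Int) + 1) 0))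
                     ((((List.range (k+1)).map (fun j => pvE a b (i+1) j)).getLast?).getD 0)])
        = (List.range (k+2)).map (fun j => pvE a b (i+1) j) := by
      rw [pvRow_pyGetD a b i k (by omega)]
      rw [show ((k : Int) + 1) = ((k+1 : Nat) : Int) by push_cast; ring]
      rw [pvRow_pyGetD a b i (k+1) (by omega)]
      rw [map_range_getLast]
      rw [show (List.range (k+2)) = List.range (k+1) ++ [k+1] from List.range_succ]
      rw [List.map_append, List.map_singleton]
      have hrec : pvE a b (i+1) (k+1) =
          if b.getD k ' ' = a.getD i ' ' then pvE a b i k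
          else 1 + min (min (pvE a b i k) (pvE a b i (k+1))) (pvE a b (i+1) k) := by
        rw [pvE]
      by_cases hcc : d == c
      · rw [if_pos hcc]
        have : b.getD k ' ' = a.getD i ' ' := by
          rw [hd, ← hc]; exact eq_of_beq hcc
        rw [hrec, if_pos this]
      · rw [if_neg hcc]
        have : ¬ (b.getD k ' ' = a.getD i ' ') := by
          rw [hd, ← hc]; intro h'; exact hcc (beq_iff_eq.mpr h')
        rw [hrec, if_neg this]
    rw [hstep]
    rw [show (k : Int) + 1 = ((k+1 : Nat) : Int) by push_cast; ring]
    exact ih (k+1) hqs' (by simp at hlen ⊢; omega)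

-- outer loop of A over a suffix of the word
theorem pv_outerA (a b : List Char) :
    ∀ (ws : List Char) (i : Nat), ws = a.drop i → i + ws.length = a.length →
    (PySem.List.enumerate ws (i : Int)).foldl
      (fun distances iw =>
        (PySem.List.enumerate b).foldl
          (fun another iq =>
            if iq.2 == iw.2 then
              another ++ [PySem.List.pyGetD distances iq.1 0]
            else
              another ++ [1 + min (min (PySem.List.pyGetD distances iq.1 0)
                                       (PySem.List.pyGetD distances (iq.1 + 1) 0))
                                  (another.getLast?.getD 0)])
          [iw.1 + 1])
      (pvRowFn a b i)
    = pvRowFn a b a.length := by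
  intro ws
  induction ws with
  | nil =>
    intro i hdrop hlen
    simp only [List.length_nil, Nat.add_zero] at hlen
    subst hlen
    simp [PySem.List.enumerate]
  | cons c ws' ih =>
    intro i hdrop hlen
    obtain ⟨hd, hws'⟩ := drop_cons_getD a i ' ' c ws' hdrop.symm
    rw [PySem.List.enumerate_cons, List.foldl_cons]
    have hinit : [(i : Int) + 1] = (List.range (0+1)).map (fun j => pvE a b (i+1) j) := by
      simp [pvE]
    rw [hinit]
    rw [show (PySem.List.enumerate b : List (Int × Char)) = PySem.List.enumerate b ((0 : Nat) : Int) by norm_num]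
    rw [pv_innerA a b i c hd.symm b 0 (by simp) (by simp)]
    rw [show (i : Int) + 1 = ((i+1 : Nat) : Int) by push_cast; ring]
    exact ih (i+1) hws' (by simp at hlen ⊢; omega)

-- A's per-word distance equals the prefix spec at full lengths
theorem pv_wordA (w q : List Char) :
    PySem.List.pyGetD
      ((PySem.List.enumerate w).foldl
        (fun distances iw =>
          (PySem.List.enumerate q).foldl
            (fun another iq =>
              if iq.2 == iw.2 then
                another ++ [PySem.List.pyGetD distances iq.1 0]
              else
                another ++ [1 + min (min (PySem.List.pyGetD distances iq.1 0)
                                         (PySem.List.pyGetD distances (iq.1 + 1) 0))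
                                    (another.getLast?.getD 0)])
            [iw.1 + 1])
        (PySem.List.pyRange 0 ((q.length : Int) + 1) 1))
      (-1) 0
    = pvE w q w.length q.length := by
  rw [pvRow_zero w q]
  rw [show (PySem.List.enumerate w : List (Int × Char)) = PySem.List.enumerate w ((0 : Nat) : Int) by norm_num]
  rw [pv_outerA w q w 0 (by simp) (by simp)]
  exact pvRow_last w q w.length

-- ===== B-side lemmas =====

-- getD agreement from an equal take-prefix
theorem getD_eq_of_take_eq {α : Type} (a a' : List α) (n k : Nat) (d : α)
    (h : a.take n = a'.take n) (hk : k < n) : a.getD k d = a'.getD k d := by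
  have h1 : a[k]? = a'[k]? := by
    have h2 := congrArg (fun l => l[k]?) h
    simpa [List.getElem?_take_of_lt hk] using h2
  rw [List.getD_eq_getElem?_getD, List.getD_eq_getElem?_getD, h1]

-- pvE depends on a only through its first i characters
theorem pvE_congr_aux (n : Nat) : ∀ (a a' b : List Char) (i j : Nat), i + j ≤ n →
    a.take i = a'.take i → pvE a b i j = pvE a' b i j := by
  induction n with
  | zero =>
    intro a a' b i j h _
    have hi : i = 0 := by omega
    have hj : j = 0 := by omega
    subst hi; subst hj; simp [pvE]
  | succ n ih =>
    intro a a' b i j h ht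
    match i, j with
    | 0, j => simp [pvE]
    | i+1, 0 => simp [pvE]
    | i+1, j+1 =>
      have hti : a.take i = a'.take i := by
        have := congrArg (fun l => List.take i l) ht
        simpa [List.take_take] using this
      have hgi : a.getD i ' ' = a'.getD i ' ' :=
        getD_eq_of_take_eq a a' (i+1) i ' ' ht (by omega)
      rw [pvE, pvE, hgi]
      rw [ih a a' b i j (by omega) hti, ih a a' b i (j+1) (by omega) hti,
        ih a a' b (i+1) j (by omega) ht]

theorem pvRowFn_congr (a a' b : List Char) (i : Nat) (h : a.take i = a'.take i) :
    pvRowFn a b i = pvRowFn a' b i := by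
  unfold pvRowFn
  apply List.map_congr_left
  intro j _
  exact pvE_congr_aux (i + j) a a' b i j le_rfl h

-- pvLcp facts
theorem pvLcp_le_left : ∀ (a b : List Char), pvLcp a b ≤ a.length := by
  intro a
  induction a with
  | nil => intro b; cases b <;> simp [pvLcp]
  | cons x xs ih =>
    intro b
    cases b with
    | nil => simp [pvLcp]
    | cons y ys =>
      simp only [pvLcp, List.length_cons]
      split
      · have := ih ys; omega
      · omega

theorem pvLcp_le_right : ∀ (a b : List Char), pvLcp a b ≤ b.length := by
  intro a
  induction a with
  | nil => intro b; cases b <;> simp [pvLcp]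
  | cons x xs ih =>
    intro b
    cases b with
    | nil => simp [pvLcp]
    | cons y ys =>
      simp only [pvLcp, List.length_cons]
      split
      · have := ih ys; omega
      · omega

theorem pvLcp_take : ∀ (a b : List Char), a.take (pvLcp a b) = b.take (pvLcp a b) := by
  intro a
  induction a with
  | nil => intro b; cases b <;> simp [pvLcp]
  | cons x xs ih =>
    intro b
    cases b with
    | nil => simp [pvLcp]
    | cons y ys =>
      simp only [pvLcp]
      split
      next h =>
        have hxy : x = y := by
          have := h; simp at this; exact this
        subst hxy
        simp [List.take_succ_cons, ih ys]
      next h => simp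

-- one pvRowStep from the row of prefix i gives the row of prefix i+1
theorem pv_rowStepAux (a b : List Char) (i : Nat) (c : Char) (hc : c = a.getD i ' ') :
    ∀ (bs : List Char) (k : Nat), bs = b.drop k → k + bs.length = b.length →
    (PySem.List.enumerate bs (k : Int)).foldl
      (fun row j =>
        row ++ [if j.2 == c then PySem.List.pyGetD (pvRowFn a b i) j.1 0
                else 1 + min (min (PySem.List.pyGetD (pvRowFn a b i) j.1 0)
                                  (PySem.List.pyGetD (pvRowFn a b i) (j.1 + 1) 0))
                             (row.getLast?.getD 0)])
      ((List.range (k+1)).map (fun j => pvE a b (i+1) j))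
    = pvRowFn a b (i+1) := by
  intro bs
  induction bs with
  | nil =>
    intro k hdrop hlen
    simp only [List.length_nil, Nat.add_zero] at hlen
    subst hlen
    simp [PySem.List.enumerate, pvRowFn]
  | cons d bs' ih =>
    intro k hdrop hlen
    obtain ⟨hd, hbs'⟩ := drop_cons_getD b k ' ' d bs' hdrop.symm
    have hk : k < b.length := by simp at hlen; omega
    rw [PySem.List.enumerate_cons, List.foldl_cons]
    have hstep :
        ((List.range (k+1)).map (fun j => pvE a b (i+1) j)) ++
          [if d == c then PySem.List.pyGetD (pvRowFn a b i) (k : Int) 0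
           else 1 + min (min (PySem.List.pyGetD (pvRowFn a b i) (k : Int) 0)
                             (PySem.List.pyGetD (pvRowFn a b i) ((k : Int) + 1) 0))
                        ((((List.range (k+1)).map (fun j => pvE a b (i+1) j)).getLast?).getD 0)]
        = (List.range (k+2)).map (fun j => pvE a b (i+1) j) := by
      rw [pvRow_pyGetD a b i k (by omega)]
      rw [show ((k : Int) + 1) = ((k+1 : Nat) : Int) by push_cast; ring]
      rw [pvRow_pyGetD a b i (k+1) (by omega)]
      rw [map_range_getLast]
      rw [show (List.range (k+2)) = List.range (k+1) ++ [k+1] from List.range_succ]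
      rw [List.map_append, List.map_singleton]
      have hrec : pvE a b (i+1) (k+1) =
          if b.getD k ' ' = a.getD i ' ' then pvE a b i k
          else 1 + min (min (pvE a b i k) (pvE a b i (k+1))) (pvE a b (i+1) k) := by
        rw [pvE]
      by_cases hcc : d == c
      · rw [if_pos hcc]
        have : b.getD k ' ' = a.getD i ' ' := by
          rw [hd, ← hc]; exact eq_of_beq hcc
        rw [hrec, if_pos this]
      · rw [if_neg hcc]
        have : ¬ (b.getD k ' ' = a.getD i ' ') := by
          rw [hd, ← hc]; intro h'; exact hcc (beq_iff_eq.mpr h')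
        rw [hrec, if_neg this]
    rw [hstep]
    rw [show (k : Int) + 1 = ((k+1 : Nat) : Int) by push_cast; ring]
    exact ih (k+1) hbs' (by simp at hlen ⊢; omega)

theorem pv_rowStep_eq (a b : List Char) (i : Nat) :
    pvRowStep b (pvRowFn a b i) (i : Int) (a.getD i ' ') = pvRowFn a b (i+1) := by
  unfold pvRowStep
  have hinit : [(i : Int) + 1] = (List.range (0+1)).map (fun j => pvE a b (i+1) j) := by
    simp [pvE]
  rw [hinit]
  rw [show (PySem.List.enumerate b : List (Int × Char)) = PySem.List.enumerate b ((0 : Nat) : Int) by norm_num]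
  exact pv_rowStepAux a b i (a.getD i ' ') rfl b 0 (by simp) (by simp)

-- extending the row stack over a suffix of the word
theorem pv_extend (a b : List Char) :
    ∀ (ws : List Char) (k : Nat), ws = a.drop k → k + ws.length = a.length →
    (PySem.List.enumerate ws (k : Int)).foldl
      (fun rows ic => rows ++ [pvRowStep b (rows.getLast?.getD []) ic.1 ic.2])
      (pvRows a b k)
    = pvRows a b a.length := by
  intro ws
  induction ws with
  | nil =>
    intro k hdrop hlen
    simp only [List.length_nil, Nat.add_zero] at hlen
    subst hlen
    simp [PySem.List.enumerate]
  | cons c ws' ih =>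
    intro k hdrop hlen
    obtain ⟨hd, hws'⟩ := drop_cons_getD a k ' ' c ws' hdrop.symm
    rw [PySem.List.enumerate_cons, List.foldl_cons]
    have hlast : (pvRows a b k).getLast?.getD [] = pvRowFn a b k := by
      unfold pvRows; exact map_range_getLast _ k []
    have hrow : pvRowStep b ((pvRows a b k).getLast?.getD []) (k : Int) c
        = pvRowFn a b (k+1) := by
      rw [hlast, ← hd, pv_rowStep_eq]
    have happ : pvRows a b k ++ [pvRowFn a b (k+1)] = pvRows a b (k+1) := by
      unfold pvRows
      rw [show (List.range (k+2)) = List.range (k+1) ++ [k+1] from List.range_succ,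
        List.map_append, List.map_singleton]
    rw [hrow, happ]
    rw [show (k : Int) + 1 = ((k+1 : Nat) : Int) by push_cast; ring]
    exact ih (k+1) hws' (by simp at hlen ⊢; omega)

-- the distance B records for one word
def pvF (q : List Char) (w : String) : Int := pvE w.toList q w.toList.length q.length

-- invariant of B's fold over the sorted distinct words: only the dict matters,
-- and it receives exactly pvF per word
theorem pv_main (q : List Char) :
    ∀ (l : List String) (rows : List (List Int)) (prevc : List Char)
      (d : PySem.Dict String Int),
    rows = pvRows prevc q prevc.length →
    (l.foldl (pvStepWord q) (rows, prevc, d)).2.2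
      = l.foldl (fun d w => d.insert w (pvF q w)) d := by
  intro l
  induction l with
  | nil => intro rows prevc d _; rfl
  | cons word l' ih =>
    intro rows prevc d h
    rw [List.foldl_cons, List.foldl_cons]
    set w := word.toList with hw
    set p := pvLcp prevc w with hp
    have hp1 : p ≤ prevc.length := pvLcp_le_left prevc w
    have hp2 : p ≤ w.length := pvLcp_le_right prevc w
    have htake : rows.take (p+1) = pvRows w q p := by
      rw [h]
      unfold pvRows
      rw [← List.map_take, List.take_range]
      have hmin : min (p+1) (prevc.length+1) = p + 1 := by omega
      rw [hmin]
      apply List.map_congr_left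
      intro i hi
      have hi' : i ≤ p := by
        have := List.mem_range.mp hi; omega
      apply pvRowFn_congr
      have h1 : prevc.take i = (prevc.take p).take i := by
        rw [List.take_take, Nat.min_eq_left hi']
      have h2 : w.take i = (w.take p).take i := by
        rw [List.take_take, Nat.min_eq_left hi']
      rw [h1, h2, pvLcp_take prevc w]
    have hrows2 :
        (PySem.List.enumerate (w.drop p) (p : Int)).foldl
          (fun rows ic => rows ++ [pvRowStep q (rows.getLast?.getD []) ic.1 ic.2])
          (rows.take (p+1))
        = pvRows w q w.length := by
      rw [htake]
      exact pv_extend w q (w.drop p) p rfl (by simp [List.length_drop]; omega)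
    have hval :
        PySem.List.pyGetD (PySem.List.pyGetD (pvRows w q w.length) ((w.length : Nat) : Int) [])
          (-1) 0 = pvF q word := by
      have hrow : PySem.List.pyGetD (pvRows w q w.length) ((w.length : Nat) : Int) []
          = pvRowFn w q w.length := by
        rw [PySem.List.pyGetD_natCast]
        unfold pvRows
        rw [List.getD_eq_getElem?_getD, List.getElem?_map, List.getElem?_range (by omega)]
        rfl
      rw [hrow, pvRow_last]
      rfl
    show (l'.foldl (pvStepWord q) (pvStepWord q (rows, prevc, d) word)).2.2 = _
    have hstep : pvStepWord q (rows, prevc, d) word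
        = (pvRows w q w.length, w, d.insert word (pvF q word)) := by
      unfold pvStepWord
      simp only [← hw, ← hp]
      rw [hrows2, hval]
    rw [hstep]
    exact ih _ w _ (by rfl)

-- A's dict fold with a key-determined value has items = dedup paired with the value
theorem items_foldl_insert_keyfn (F : String → Int) :
    ∀ (l : List String),
    ((l.foldl (fun d w => d.insert w (F w)) (PySem.Dict.empty : PySem.Dict String Int)).items)
      = (PySem.List.dedup l).map (fun w => (w, F w)) := by
  intro l
  induction l using List.reverseRecOn with
  | nil => rfl
  | append_singleton l w ih =>
    rw [List.foldl_append, List.foldl_cons, List.foldl_nil]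
    set dl := l.foldl (fun d w => d.insert w (F w)) (PySem.Dict.empty : PySem.Dict String Int) with hdl
    have hkeys : dl.keys = PySem.List.dedup l := by
      show dl.items.map Prod.fst = _
      rw [ih, List.map_map]
      simp [Function.comp_def]
    have hded : PySem.List.dedup (l ++ [w])
        = if w ∈ PySem.List.dedup l then PySem.List.dedup l
          else PySem.List.dedup l ++ [w] := by
      simp only [PySem.List.dedup_eq_ofList, PySem.Set.ofList_append_singleton]
      unfold PySem.Set.add
      by_cases hmem : w ∈ PySem.Set.ofList l
      · rw [if_pos (by simpa [PySem.Set.contains] using hmem), if_pos hmem]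
      · rw [if_neg (by simpa [PySem.Set.contains] using hmem), if_neg hmem]
    by_cases hc : dl.contains w
    · have hmem : w ∈ PySem.List.dedup l := by
        have := hc
        rw [PySem.Dict.contains_eq_decide_mem_keys, hkeys] at this
        exact of_decide_eq_true this
      rw [PySem.Dict.items_insert_of_contains dl (F w) hc, ih, hded, if_pos hmem]
      rw [List.map_map]
      apply List.map_congr_left
      intro u _
      by_cases hu : u == w
      · have : u = w := eq_of_beq hu
        simp [Function.comp, this]
      · simp [Function.comp, hu]
    · have hmem : w ∉ PySem.List.dedup l := by
        intro hmem
        have : dl.contains w := by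
          rw [PySem.Dict.contains_eq_decide_mem_keys, hkeys]
          exact decide_eq_true hmem
        exact absurd this (by simpa using hc)
      rw [PySem.Dict.items_insert_of_not_contains dl (F w) (by simpa using hc), ih, hded, if_neg hmem,
        List.map_append, List.map_singleton]

-- lookup in a dict built by inserting a key-determined value
theorem get?_foldl_insert_keyfn (F : String → Int) :
    ∀ (l : List String) (d : PySem.Dict String Int) (w : String),
    (l.foldl (fun d u => d.insert u (F u)) d).get? w
      = if w ∈ l then some (F w) else d.get? w := by
  intro l
  induction l with
  | nil => intro d w; simp
  | cons u l' ih =>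
    intro d w
    rw [List.foldl_cons, ih]
    by_cases hl : w ∈ l'
    · rw [if_pos hl, if_pos (List.mem_cons.mpr (Or.inr hl))]
    · rw [if_neg hl, PySem.Dict.get?_insert]
      by_cases he : w = u
      · rw [if_pos he, if_pos (List.mem_cons.mpr (Or.inl he)), he]
      · rw [if_neg he, if_neg (by simp [List.mem_cons, he, hl])]

-- ===== VERDICT (by name: the statement is the Claim_ definition above) =====
theorem distance_words_spec : Claim_equal_distance_words := by
  intro result query _
  unfold Spec_distance_words
  simp only [distance_words, distance_words_alt]
  -- A's value function per word
  have hA := items_foldl_insert_keyfn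
    (fun word =>
      PySem.List.pyGetD
        ((PySem.List.enumerate word.toList).foldl
          (fun distances iw =>
            (PySem.List.enumerate query.toList).foldl
              (fun another iq =>
                if iq.2 == iw.2 then
                  another ++ [PySem.List.pyGetD distances iq.1 0]
                else
                  another ++ [1 + min (min (PySem.List.pyGetD distances iq.1 0)
                                           (PySem.List.pyGetD distances (iq.1 + 1) 0))
                                      (another.getLast?.getD 0)])
              [iw.1 + 1])
          (PySem.List.pyRange 0 ((query.toList.length : Int) + 1) 1))
        (-1) 0)
    result
  beta_reduce at hA
  rw [hA]
  have hAmap : (PySem.List.dedup result).map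
      (fun w => (w,
        PySem.List.pyGetD
          ((PySem.List.enumerate w.toList).foldl
            (fun distances iw =>
              (PySem.List.enumerate query.toList).foldl
                (fun another iq =>
                  if iq.2 == iw.2 then
                    another ++ [PySem.List.pyGetD distances iq.1 0]
                  else
                    another ++ [1 + min (min (PySem.List.pyGetD distances iq.1 0)
                                             (PySem.List.pyGetD distances (iq.1 + 1) 0))
                                        (another.getLast?.getD 0)])
                [iw.1 + 1])
            (PySem.List.pyRange 0 ((query.toList.length : Int) + 1) 1))
          (-1) 0))
      = (PySem.List.dedup result).map (fun w => (w, pvF query.toList w)) := by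
    apply List.map_congr_left
    intro w _
    rw [pv_wordA w.toList query.toList]
    rfl
  rw [hAmap]
  -- B's fold: only the dict survives, and lookups return pvF
  have hB := pv_main query.toList
    (PySem.List.sorted (PySem.List.dedup result) (fun w => w) false)
    [PySem.List.pyRange 0 ((query.toList.length : Int) + 1) 1] [] PySem.Dict.empty
    (by
      unfold pvRows
      have h1 : List.range (List.length ([] : List Char) + 1) = [0] := rfl
      rw [h1, List.map_singleton, pvRow_zero [] query.toList])
  rw [hB]
  have hBmap : (PySem.List.dedup result).map
      (fun w => (w,
        (((PySem.List.sorted (PySem.List.dedup result) (fun w => w) false).foldl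
            (fun d w => d.insert w (pvF query.toList w)) PySem.Dict.empty).get? w).getD 0))
      = (PySem.List.dedup result).map (fun w => (w, pvF query.toList w)) := by
    apply List.map_congr_left
    intro w hw
    have hmem : w ∈ PySem.List.sorted (PySem.List.dedup result) (fun w => w) false :=
      (PySem.List.mem_sorted _ _ _ _).mpr hw
    rw [get?_foldl_insert_keyfn, if_pos hmem]
    rfl
  rw [hBmap]
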